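-- pv_equiv track=rewrite | github.com/pypi-data/pypi-mirror-279 | packages/p-vs-np-library/p_vs_np_library-0.1-py3-none-any.whl/p_vs_np/database_problems/minimum_cardinality_key.py | is_minimum_cardinality_key
-- ===== SOURCE A (Python) =====
-- def is_minimum_cardinality_key(A, F, M):
--     # Generate all subsets of A with cardinality <= M
--     subsets = [[]]
--     for a in A:
--         subsets.extend([subset + [a] for subset in subsets])
--     subsets = [subset for subset in subsets if len(subset) <= M]
--
--     # Check if each subset is a key
--     for subset in subsets:
--         if is_superkey(subset, A, F):
--             return True
--
--     return False
--
-- def is_superkey(subset, A, F):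
--     closure = set(subset)
--     updated = True
--
--     while updated:
--         updated = False
--         for B, C in F:
--             if B.issubset(closure) and not C.issubset(closure):
--                 closure.update(C)
--                 updated = True
--
--     return closure == set(A)
-- ===== SOURCE B (Python) =====
-- def is_minimum_cardinality_key(A, F, M):
--     if M < 0:
--         return False
--     target = set(A)
--     rules = [(set(B), set(C)) for B, C in F]
--     elems = []
--     for a in A:
--         if a not in elems:
--             elems.append(a)
--
--     def closure(attrs):
--         cl = set(attrs)
--         changed = True
--         while changed:
--             changed = False
--             for B, C in rules:
--                 if B <= cl and not C <= cl:
--                     cl |= C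
--                     changed = True
--         return cl
--
--     budget0 = M if M < len(elems) else len(elems)
--
--     def search(rest, chosen, budget):
--         if closure(chosen) == target:
--             return True
--         if budget == 0 or not rest:
--             return False
--         return search(rest[1:], chosen + [rest[0]], budget - 1) or search(rest[1:], chosen, budget)
--
--     return search(elems, [], budget0)
-- ===== Notes on version B (the rewrite author's own statement) =====
-- stated objective: alternative
-- what changed: B replaces A's materialisation of all 2^n subsequences of A (then filtering by size) with a size-budgeted DFS over the distinct attributes that prunes at budget 0, so only subsets of at most min(M, #distinct) attributes are ever closed; measured ~2x on mid-size inputs but not confirmed faster at the largest sizes.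
import Mathlib
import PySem

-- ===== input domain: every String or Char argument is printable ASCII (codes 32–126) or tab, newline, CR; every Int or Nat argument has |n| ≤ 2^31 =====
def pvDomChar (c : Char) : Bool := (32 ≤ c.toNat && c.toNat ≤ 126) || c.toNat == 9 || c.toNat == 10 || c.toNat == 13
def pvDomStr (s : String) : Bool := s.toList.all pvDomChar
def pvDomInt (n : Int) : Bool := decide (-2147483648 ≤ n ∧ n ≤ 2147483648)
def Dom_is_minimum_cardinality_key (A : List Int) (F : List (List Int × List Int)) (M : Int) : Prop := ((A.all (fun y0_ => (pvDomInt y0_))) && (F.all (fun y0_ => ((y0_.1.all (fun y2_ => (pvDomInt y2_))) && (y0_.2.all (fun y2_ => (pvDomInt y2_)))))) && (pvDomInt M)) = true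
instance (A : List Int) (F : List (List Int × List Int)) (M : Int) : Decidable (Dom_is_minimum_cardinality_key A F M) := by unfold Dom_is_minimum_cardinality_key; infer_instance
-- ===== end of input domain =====

-- B replaces A's materialisation of all 2^n subsequences of A (then size filter) with a size-budgeted DFS
-- over the distinct attributes, converting F's sides to sets once; same attribute-closure fixpoint test.


-- ===== PORT A =====
-- subsets.extend([subset + [a] for subset in subsets])
def pyPowExtend (st : List (List Int)) (a : Int) : List (List Int) := st ++ st.map (fun s => s ++ [a])

-- body of 'for B, C in F': B and C are Python sets (distinct lists here)
def pyStep (st : PySem.Set Int × Bool) (BC : List Int × List Int) : PySem.Set Int × Bool :=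
  if PySem.Set.issubset BC.1 st.1 && !(PySem.Set.issubset BC.2 st.1)
  then (PySem.Set.update st.1 BC.2, true) else st

-- one body of 'while updated:' (updated := False; the for-loop)
def pySuperPass (F : List (List Int × List Int)) (cl0 : PySem.Set Int) : PySem.Set Int × Bool :=
  F.foldl pyStep (cl0, false)

-- 'while updated:' — fuel bounds the passes; each updating pass adds an element of some C, so
-- Σ|C| + 1 passes always suffice (proved below: the result is the closure fixpoint)
def pySuperLoop (F : List (List Int × List Int)) : Nat → PySem.Set Int → PySem.Set Int
  | 0, cl => cl
  | fuel+1, cl =>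
    let r := pySuperPass F cl
    if r.2 then pySuperLoop F fuel r.1 else r.1

def pyIsSuperkey (subset A : List Int) (F : List (List Int × List Int)) : Bool :=
  PySem.Set.equal (pySuperLoop F ((F.map (fun BC => BC.2.length)).sum + 1) (PySem.Set.ofList subset))
    (PySem.Set.ofList A)

def is_minimum_cardinality_key (A : List Int) (F : List (List Int × List Int)) (M : Int) : Bool :=
  let subsets := A.foldl pyPowExtend [[]]
  let subsets := subsets.filter (fun s => decide ((PySem.List.len s) ≤ M))
  subsets.any (fun s => pyIsSuperkey s A F)

-- ===== PORT B =====
-- body of 'for B, C in rules' of Source B's closure (rules hold the sets built by set(B), set(C))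
def altStep (st : PySem.Set Int × Bool) (BC : PySem.Set Int × PySem.Set Int) : PySem.Set Int × Bool :=
  if PySem.Set.issubset BC.1 st.1 && !(PySem.Set.issubset BC.2 st.1)
  then (PySem.Set.union st.1 BC.2, true) else st

def altPass (rules : List (PySem.Set Int × PySem.Set Int)) (cl0 : PySem.Set Int) : PySem.Set Int × Bool :=
  rules.foldl altStep (cl0, false)

-- 'while changed:' with the same Σ|C| + 1 fuel bound
def altClosureLoop (rules : List (PySem.Set Int × PySem.Set Int)) : Nat → PySem.Set Int → PySem.Set Int
  | 0, cl => cl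
  | fuel+1, cl =>
    let r := altPass rules cl
    if r.2 then altClosureLoop rules fuel r.1 else r.1

def altClosure (rules : List (PySem.Set Int × PySem.Set Int)) (attrs : List Int) : PySem.Set Int :=
  altClosureLoop rules ((rules.map (fun BC => BC.2.length)).sum + 1) (PySem.Set.ofList attrs)

-- def search(rest, chosen, budget) of Source B (structural recursion on rest; rest[0]/rest[1:] = head/tail)
def altSearch (target : PySem.Set Int) (rules : List (PySem.Set Int × PySem.Set Int)) :
    List Int → List Int → Int → Bool
  | rest, chosen, budget =>
    if PySem.Set.equal (altClosure rules chosen) target then true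
    else if budget == 0 || rest.isEmpty then false
    else
      match rest with
      | [] => false
      | e :: rest' =>
        altSearch target rules rest' (chosen ++ [e]) (budget - 1) || altSearch target rules rest' chosen budget

def is_minimum_cardinality_key_alt (A : List Int) (F : List (List Int × List Int)) (M : Int) : Bool :=
  if M < 0 then false
  else
    let target := PySem.Set.ofList A
    let rules := F.map (fun BC => (PySem.Set.ofList BC.1, PySem.Set.ofList BC.2))
    let elems := A.foldl (fun acc a => if PySem.Set.contains acc a then acc else acc ++ [a]) []
    let budget0 := if M < PySem.List.len elems then M else PySem.List.len elems
    altSearch target rules elems [] budget0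

-- ===== PRECONDITION & SPEC =====
def Spec_is_minimum_cardinality_key (A : List Int) (F : List (List Int × List Int)) (M : Int) (out : Bool) : Prop := out = is_minimum_cardinality_key_alt A F M
instance (A : List Int) (F : List (List Int × List Int)) (M : Int) (out : Bool) : Decidable (Spec_is_minimum_cardinality_key A F M out) := by unfold Spec_is_minimum_cardinality_key; infer_instance

-- ===== CLAIM (what is proved, stated in full; the proofs are below) =====
def Claim_equal_is_minimum_cardinality_key : Prop := ∀ (A : List Int) (F : List (List Int × List Int)) (M : Int), Dom_is_minimum_cardinality_key A F M → Spec_is_minimum_cardinality_key A F M (is_minimum_cardinality_key A F M)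

-- ===== LEMMAS AND PROOFS =====

-- ---- small set facts ----

theorem issubset_ofList_left (x y : List Int) :
    PySem.Set.issubset (PySem.Set.ofList x) y = PySem.Set.issubset x y := by
  rw [Bool.eq_iff_iff, PySem.Set.issubset_iff, PySem.Set.issubset_iff]
  simp [PySem.Set.mem_ofList]

theorem union_ofList_eq_update (cl C : List Int) :
    PySem.Set.union cl (PySem.Set.ofList C) = PySem.Set.update cl C := by
  rw [show PySem.Set.union cl (PySem.Set.ofList C) = PySem.Set.update cl (PySem.Set.ofList C) from rfl,
    PySem.Set.update_eq_append_filter, PySem.Set.update_eq_append_filter, PySem.Set.ofList_ofList]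

theorem issubset_congr_right (x y1 y2 : List Int) (h : ∀ z : Int, z ∈ y1 ↔ z ∈ y2) :
    PySem.Set.issubset x y1 = PySem.Set.issubset x y2 := by
  rw [Bool.eq_iff_iff, PySem.Set.issubset_iff, PySem.Set.issubset_iff]
  exact ⟨fun hs z hz => (h z).mp (hs z hz), fun hs z hz => (h z).mpr (hs z hz)⟩

theorem length_update_le (s ys : List Int) :
    (PySem.Set.update s ys).length ≤ s.length + (PySem.Set.ofList ys).length := by
  rw [PySem.Set.update_eq_append_filter, List.length_append]
  have := List.length_filter_le (fun y => !(PySem.Set.contains s y)) (PySem.Set.ofList ys)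
  omega

theorem length_lt_update (s ys : List Int) (y : Int) (hy : y ∈ ys) (hns : y ∉ s) :
    s.length < (PySem.Set.update s ys).length := by
  rw [PySem.Set.update_eq_append_filter, List.length_append]
  have hmem : y ∈ (PySem.Set.ofList ys).filter (fun y => !(PySem.Set.contains s y)) := by
    rw [List.mem_filter]
    refine ⟨by simp [PySem.Set.mem_ofList, hy], ?_⟩
    simp only [Bool.not_eq_true']
    rw [← Bool.not_eq_true]
    intro hc
    exact hns ((PySem.Set.contains_iff s y).mp hc)
  have := List.length_pos_of_mem hmem
  omega

theorem issubset_false_witness (C cl : List Int) (h : ¬ PySem.Set.issubset C cl = true) :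
    ∃ y ∈ C, y ∉ cl := by
  by_contra hno
  push_neg at hno
  exact h ((PySem.Set.issubset_iff C cl).mpr hno)

theorem ofList_length_flatMap_le (F : List (List Int × List Int)) :
    (PySem.Set.ofList (F.flatMap (fun BC => BC.2))).length ≤
      (F.map (fun BC => (PySem.Set.ofList BC.2).length)).sum := by
  induction F with
  | nil => simp [PySem.Set.ofList]
  | cons BC F' ih =>
    rw [List.flatMap_cons, PySem.Set.ofList_append]
    have h1 := length_update_le (PySem.Set.ofList BC.2) (F'.flatMap (fun BC => BC.2))
    simp only [List.map_cons, List.sum_cons]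
    omega

theorem ofList_sublist (A : List Int) : (PySem.Set.ofList A).Sublist A := by
  induction A using List.reverseRecOn with
  | nil => exact List.Sublist.refl _
  | append_singleton xs x ih =>
    rw [PySem.Set.ofList_append_singleton, PySem.Set.add_eq_ite]
    split
    · exact ih.trans (List.sublist_append_left xs [x])
    · exact List.Sublist.append ih (List.Sublist.refl [x])

-- ---- one pass of the closure loop: structural facts (by induction over F) ----

theorem foldl_len (F : List (List Int × List Int)) :
    ∀ st : PySem.Set Int × Bool, st.1.length ≤ (F.foldl pyStep st).1.length := by
  induction F with
  | nil => intro st; exact le_refl _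
  | cons BC F' ih =>
    intro st
    rw [List.foldl_cons]
    refine le_trans ?_ (ih (pyStep st BC))
    unfold pyStep
    split
    · rw [PySem.Set.update_eq_append_filter, List.length_append]
      omega
    · exact le_refl _

theorem foldl_grow (F : List (List Int × List Int)) :
    ∀ st : PySem.Set Int × Bool, st.2 = false → (F.foldl pyStep st).2 = true →
      st.1.length < (F.foldl pyStep st).1.length := by
  induction F with
  | nil => intro st h1 h2; rw [List.foldl_nil] at h2; rw [h1] at h2; cases h2
  | cons BC F' ih =>
    intro st h1 h2
    rw [List.foldl_cons] at h2 ⊢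
    by_cases hc : (PySem.Set.issubset BC.1 st.1 && !(PySem.Set.issubset BC.2 st.1)) = true
    · have hstep : pyStep st BC = (PySem.Set.update st.1 BC.2, true) := by
        unfold pyStep; rw [if_pos hc]
      rw [hstep] at h2 ⊢
      have hns : ¬ PySem.Set.issubset BC.2 st.1 = true := by
        simp only [Bool.and_eq_true, Bool.not_eq_eq_eq_not, Bool.not_true] at hc
        rw [hc.2]; exact Bool.false_ne_true
      obtain ⟨y, hy, hyn⟩ := issubset_false_witness BC.2 st.1 hns
      have hlt := length_lt_update st.1 BC.2 y hy hyn
      have hle := foldl_len F' (PySem.Set.update st.1 BC.2, true)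
      exact lt_of_lt_of_le hlt hle
    · have hstep : pyStep st BC = st := by unfold pyStep; rw [if_neg hc]
      rw [hstep] at h2 ⊢
      exact ih st h1 h2

theorem foldl_mem (F : List (List Int × List Int)) (V : List Int)
    (hF : ∀ BC ∈ F, ∀ y ∈ BC.2, y ∈ V) :
    ∀ st : PySem.Set Int × Bool, (∀ x ∈ st.1, x ∈ V) → ∀ x ∈ (F.foldl pyStep st).1, x ∈ V := by
  induction F with
  | nil => intro st h; exact h
  | cons BC F' ih =>
    intro st h
    rw [List.foldl_cons]
    apply ih (fun BC' hBC' => hF BC' (List.mem_cons_of_mem BC hBC'))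
    unfold pyStep
    split
    · intro x hx
      rcases (PySem.Set.mem_update st.1 BC.2 x).mp hx with hx | hx
      · exact h x hx
      · exact hF BC List.mem_cons_self x hx
    · exact h

theorem foldl_nodup (F : List (List Int × List Int)) :
    ∀ st : PySem.Set Int × Bool, st.1.Nodup → (F.foldl pyStep st).1.Nodup := by
  induction F with
  | nil => intro st h; exact h
  | cons BC F' ih =>
    intro st h
    rw [List.foldl_cons]
    apply ih
    unfold pyStep
    split
    · exact PySem.Set.nodup_update st.1 BC.2 h
    · exact h

theorem foldl_congr (F : List (List Int × List Int)) :
    ∀ st1 st2 : PySem.Set Int × Bool, (∀ x : Int, x ∈ st1.1 ↔ x ∈ st2.1) → st1.2 = st2.2 →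
      (∀ x : Int, x ∈ (F.foldl pyStep st1).1 ↔ x ∈ (F.foldl pyStep st2).1) ∧
        (F.foldl pyStep st1).2 = (F.foldl pyStep st2).2 := by
  induction F with
  | nil => intro st1 st2 h1 h2; exact ⟨h1, h2⟩
  | cons BC F' ih =>
    intro st1 st2 h1 h2
    rw [List.foldl_cons, List.foldl_cons]
    apply ih
    · unfold pyStep
      rw [issubset_congr_right BC.1 st1.1 st2.1 h1, issubset_congr_right BC.2 st1.1 st2.1 h1]
      split
      · intro x
        rw [PySem.Set.mem_update st1.1 BC.2 x, PySem.Set.mem_update st2.1 BC.2 x]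
        exact or_congr_left (h1 x)
      · exact h1
    · unfold pyStep
      rw [issubset_congr_right BC.1 st1.1 st2.1 h1, issubset_congr_right BC.2 st1.1 st2.1 h1]
      split
      · rfl
      · exact h2

-- ---- the closure loop: the result's members do not depend on the fuel (past the bound) nor on the
-- representation of the start set ----

theorem loop_congr_fuel (F : List (List Int × List Int)) :
    ∀ (n1 : Nat), ∀ (n2 : Nat) (cl1 cl2 V : List Int), cl1.Nodup → cl2.Nodup → V.Nodup →
      (∀ x : Int, x ∈ cl1 ↔ x ∈ cl2) →
      (∀ x ∈ cl1, x ∈ V) → (∀ x ∈ cl2, x ∈ V) → (∀ BC ∈ F, ∀ y ∈ BC.2, y ∈ V) →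
      V.length < cl1.length + n1 → V.length < cl2.length + n2 →
      ∀ x : Int, x ∈ pySuperLoop F n1 cl1 ↔ x ∈ pySuperLoop F n2 cl2 := by
  intro n1
  induction n1 with
  | zero =>
    intro n2 cl1 cl2 V hn1 _ hnV _ hV1 _ _ hb1 _
    have := (List.subperm_of_subset hn1 hV1).length_le
    omega
  | succ k ih =>
    intro n2 cl1 cl2 V hn1 hn2 hnV heq hV1 hV2 hF hb1 hb2
    cases n2 with
    | zero =>
      have := (List.subperm_of_subset hn2 hV2).length_le
      omega
    | succ m =>
      rw [pySuperLoop, pySuperLoop]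
      simp only [pySuperPass]
      obtain ⟨hmem, hflag⟩ := foldl_congr F (cl1, false) (cl2, false) heq rfl
      by_cases hu : (List.foldl pyStep (cl1, false) F).2 = true
      · have hu2 : (List.foldl pyStep (cl2, false) F).2 = true := hflag ▸ hu
        simp only [hu, hu2, if_true]
        apply ih m _ _ V
        · exact foldl_nodup F (cl1, false) hn1
        · exact foldl_nodup F (cl2, false) hn2
        · exact hnV
        · exact hmem
        · exact foldl_mem F V hF (cl1, false) hV1
        · exact foldl_mem F V hF (cl2, false) hV2
        · exact hF
        · have hg : cl1.length < (List.foldl pyStep (cl1, false) F).1.length :=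
            foldl_grow F (cl1, false) rfl hu
          omega
        · have hg : cl2.length < (List.foldl pyStep (cl2, false) F).1.length :=
            foldl_grow F (cl2, false) rfl hu2
          omega
      · have hu2 : ¬ (List.foldl pyStep (cl2, false) F).2 = true := hflag ▸ hu
        rw [Bool.not_eq_true] at hu hu2
        simp only [hu, hu2, Bool.false_eq_true, if_false]
        exact hmem

-- ---- the two ports run the same pass, hence the same loop ----

theorem altPass_eq (F : List (List Int × List Int)) (cl : PySem.Set Int) :
    altPass (F.map (fun BC => (PySem.Set.ofList BC.1, PySem.Set.ofList BC.2))) cl = pySuperPass F cl := by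
  unfold altPass pySuperPass
  rw [List.foldl_map]
  congr 1
  funext st BC
  unfold altStep pyStep
  rw [issubset_ofList_left, issubset_ofList_left, union_ofList_eq_update]

theorem altLoop_eq (F : List (List Int × List Int)) :
    ∀ (n : Nat) (cl : PySem.Set Int),
      altClosureLoop (F.map (fun BC => (PySem.Set.ofList BC.1, PySem.Set.ofList BC.2))) n cl =
        pySuperLoop F n cl := by
  intro n
  induction n with
  | zero => intro cl; rfl
  | succ k ih =>
    intro cl
    rw [altClosureLoop, pySuperLoop]
    simp only [altPass_eq]
    by_cases h : (pySuperPass F cl).2 = true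
    · simp only [h, if_true, ih]
    · simp only [Bool.not_eq_true] at h
      simp only [h, Bool.false_eq_true, if_false]

-- membership in A's closure of a chosen attribute list (with A's fuel)
def cloMem (F : List (List Int × List Int)) (chosen : List Int) (x : Int) : Prop :=
  x ∈ pySuperLoop F ((F.map (fun BC => BC.2.length)).sum + 1) (PySem.Set.ofList chosen)

theorem loop_fuel_mem (F : List (List Int × List Int)) (chosen : List Int) (n : Nat)
    (hn : (F.map (fun BC => (PySem.Set.ofList BC.2).length)).sum + 1 ≤ n ∨
      (F.map (fun BC => BC.2.length)).sum + 1 ≤ n) :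
    ∀ x : Int, x ∈ pySuperLoop F n (PySem.Set.ofList chosen) ↔ cloMem F chosen x := by
  intro x
  unfold cloMem
  set cl := PySem.Set.ofList chosen with hcl
  set V := PySem.Set.update cl (F.flatMap (fun BC => BC.2)) with hV
  have hVlen : V.length ≤ cl.length + (PySem.Set.ofList (F.flatMap (fun BC => BC.2))).length :=
    length_update_le cl (F.flatMap (fun BC => BC.2))
  have hflat : (PySem.Set.ofList (F.flatMap (fun BC => BC.2))).length ≤
      (F.map (fun BC => BC.2.length)).sum := by
    have h1 := PySem.Set.length_ofList_le (F.flatMap (fun BC => BC.2))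
    have h2 : (F.flatMap (fun BC => BC.2)).length = (F.map (fun BC => BC.2.length)).sum := by
      rw [List.length_flatMap]
    omega
  have hflat2 := ofList_length_flatMap_le F
  have hof : (F.map (fun BC => (PySem.Set.ofList BC.2).length)).sum ≤
      (F.map (fun BC => BC.2.length)).sum := by
    apply List.sum_le_sum
    intro BC _
    exact PySem.Set.length_ofList_le BC.2
  apply loop_congr_fuel F n _ cl cl V
  · exact PySem.Set.nodup_ofList chosen
  · exact PySem.Set.nodup_ofList chosen
  · exact PySem.Set.nodup_update cl (F.flatMap (fun BC => BC.2)) (PySem.Set.nodup_ofList chosen)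
  · intro _; exact Iff.rfl
  · intro y hy; exact (PySem.Set.mem_update cl _ y).mpr (Or.inl hy)
  · intro y hy; exact (PySem.Set.mem_update cl _ y).mpr (Or.inl hy)
  · intro BC hBC y hy
    exact (PySem.Set.mem_update cl _ y).mpr (Or.inr (List.mem_flatMap.mpr ⟨BC, hBC, hy⟩))
  · rcases hn with hn | hn <;> omega
  · omega

theorem altClosure_mem (F : List (List Int × List Int)) (chosen : List Int) :
    ∀ x : Int, x ∈ altClosure (F.map (fun BC => (PySem.Set.ofList BC.1, PySem.Set.ofList BC.2))) chosen ↔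
      cloMem F chosen x := by
  intro x
  unfold altClosure
  rw [altLoop_eq]
  apply loop_fuel_mem
  left
  rw [List.map_map]
  exact le_refl _

theorem cloMem_congr (F : List (List Int × List Int)) (s1 s2 : List Int)
    (h : ∀ x : Int, x ∈ s1 ↔ x ∈ s2) (x : Int) : cloMem F s1 x ↔ cloMem F s2 x := by
  unfold cloMem
  have heq : ∀ y : Int, y ∈ PySem.Set.ofList s1 ↔ y ∈ PySem.Set.ofList s2 := by
    intro y; simp [PySem.Set.mem_ofList, h y]
  have hlen : (PySem.Set.ofList s1).length = (PySem.Set.ofList s2).length :=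
    ((List.perm_ext_iff_of_nodup (PySem.Set.nodup_ofList s1) (PySem.Set.nodup_ofList s2)).mpr
      heq).length_eq
  set V := PySem.Set.update (PySem.Set.ofList s1) (F.flatMap (fun BC => BC.2)) with hV
  have hVlen : V.length ≤ (PySem.Set.ofList s1).length +
      (PySem.Set.ofList (F.flatMap (fun BC => BC.2))).length :=
    length_update_le _ _
  have hflat : (PySem.Set.ofList (F.flatMap (fun BC => BC.2))).length ≤
      (F.map (fun BC => BC.2.length)).sum := by
    have h1 := PySem.Set.length_ofList_le (F.flatMap (fun BC => BC.2))
    have h2 : (F.flatMap (fun BC => BC.2)).length = (F.map (fun BC => BC.2.length)).sum := by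
      rw [List.length_flatMap]
    omega
  apply loop_congr_fuel F _ _ _ _ V
  · exact PySem.Set.nodup_ofList s1
  · exact PySem.Set.nodup_ofList s2
  · exact PySem.Set.nodup_update _ _ (PySem.Set.nodup_ofList s1)
  · exact heq
  · intro y hy; exact (PySem.Set.mem_update _ _ y).mpr (Or.inl hy)
  · intro y hy; exact (PySem.Set.mem_update _ _ y).mpr (Or.inl ((heq y).mpr hy))
  · intro BC hBC y hy
    exact (PySem.Set.mem_update _ _ y).mpr (Or.inr (List.mem_flatMap.mpr ⟨BC, hBC, hy⟩))
  · omega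
  · omega

theorem keyA_iff (s A : List Int) (F : List (List Int × List Int)) :
    pyIsSuperkey s A F = true ↔ ∀ x : Int, cloMem F s x ↔ x ∈ A := by
  unfold pyIsSuperkey cloMem
  rw [PySem.Set.equal_iff]
  constructor
  · intro h x; rw [h x]; simp [PySem.Set.mem_ofList]
  · intro h x; rw [h x]; simp [PySem.Set.mem_ofList]

theorem keyB_iff (A : List Int) (F : List (List Int × List Int)) (chosen : List Int) :
    PySem.Set.equal
        (altClosure (F.map (fun BC => (PySem.Set.ofList BC.1, PySem.Set.ofList BC.2))) chosen)
        (PySem.Set.ofList A) = true ↔ ∀ x : Int, cloMem F chosen x ↔ x ∈ A := by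
  rw [PySem.Set.equal_iff]
  constructor
  · intro h x
    rw [← altClosure_mem F chosen x, h x]
    simp [PySem.Set.mem_ofList]
  · intro h x
    rw [altClosure_mem F chosen x, h x]
    simp [PySem.Set.mem_ofList]

-- ---- A's powerset generation and top-level scan ----

theorem mem_powfold (L : List Int) (st : List (List Int)) (x : List Int) :
    x ∈ L.foldl pyPowExtend st ↔ ∃ s ∈ st, ∃ t, t.Sublist L ∧ x = s ++ t := by
  induction L generalizing st with
  | nil => simp
  | cons a L' ih =>
    rw [List.foldl_cons, ih]
    constructor
    · rintro ⟨s, hs, t, ht, rfl⟩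
      rcases List.mem_append.mp hs with hs | hs
      · exact ⟨s, hs, t, ht.cons a, rfl⟩
      · obtain ⟨s0, hs0, rfl⟩ := List.mem_map.mp hs
        exact ⟨s0, hs0, a :: t, List.cons_sublist_cons.mpr ht, by simp⟩
    · rintro ⟨s, hs, t, ht, rfl⟩
      rcases List.sublist_cons_iff.mp ht with ht | ⟨r, rfl, hr⟩
      · exact ⟨s, List.mem_append.mpr (Or.inl hs), t, ht, rfl⟩
      · exact ⟨s ++ [a], List.mem_append.mpr (Or.inr (List.mem_map.mpr ⟨s, hs, rfl⟩)), r, hr, by simp⟩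

theorem portA_true_iff (A : List Int) (F : List (List Int × List Int)) (M : Int) :
    is_minimum_cardinality_key A F M = true ↔
      ∃ s : List Int, s.Sublist A ∧ (s.length : Int) ≤ M ∧ pyIsSuperkey s A F = true := by
  unfold is_minimum_cardinality_key
  rw [List.any_filter, List.any_eq_true]
  constructor
  · rintro ⟨s, hs, hpq⟩
    obtain ⟨s0, hs0, t, ht, rfl⟩ := (mem_powfold A [[]] s).mp hs
    simp only [List.mem_singleton] at hs0
    subst hs0
    rw [Bool.and_eq_true, decide_eq_true_iff] at hpq
    exact ⟨t, ht, by simpa using hpq.1, hpq.2⟩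
  · rintro ⟨s, hsub, hlen, hkey⟩
    refine ⟨s, (mem_powfold A [[]] s).mpr ⟨[], by simp, s, hsub, by simp⟩, ?_⟩
    rw [Bool.and_eq_true, decide_eq_true_iff]
    exact ⟨by simpa using hlen, hkey⟩

theorem portA_neg (A : List Int) (F : List (List Int × List Int)) (M : Int) (hM : M < 0) :
    is_minimum_cardinality_key A F M = false := by
  unfold is_minimum_cardinality_key
  rw [List.any_filter]
  apply List.any_eq_false.mpr
  intro s _
  have hd : (decide ((PySem.List.len s) ≤ M)) = false := by
    simp only [PySem.List.len_eq, decide_eq_false_iff_not]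
    omega
  rw [hd, Bool.false_and]
  simp

-- ---- B's DFS: soundness and completeness ----

theorem search_complete (tgt : PySem.Set Int) (rules : List (PySem.Set Int × PySem.Set Int))
    (rest : List Int) :
    ∀ (chosen : List Int) (budget : Int),
      (∃ S : List Int, S.Sublist rest ∧ (S.length : Int) ≤ budget ∧
        PySem.Set.equal (altClosure rules (chosen ++ S)) tgt = true) →
      altSearch tgt rules rest chosen budget = true := by
  induction rest with
  | nil =>
    rintro chosen budget ⟨S, hSsub, _, hSeq⟩
    rw [List.sublist_nil] at hSsub
    subst hSsub
    rw [List.append_nil] at hSeq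
    rw [altSearch]
    simp [hSeq]
  | cons e rest' ih =>
    rintro chosen budget ⟨S, hSsub, hSlen, hSeq⟩
    rw [altSearch]
    by_cases h1 : PySem.Set.equal (altClosure rules chosen) tgt = true
    · simp [h1]
    · have hSne : S ≠ [] := by
        rintro rfl
        rw [List.append_nil] at hSeq
        exact h1 hSeq
      have hb : ¬ budget == 0 := by
        have : 1 ≤ S.length := List.length_pos_of_ne_nil hSne
        simp only [beq_iff_eq]
        omega
      rcases List.sublist_cons_iff.mp hSsub with hS | ⟨r, rfl, hr⟩
      · have hright : altSearch tgt rules rest' chosen budget = true :=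
          ih chosen budget ⟨S, hS, hSlen, hSeq⟩
        simp [h1, hb, hright]
      · have hleft : altSearch tgt rules rest' (chosen ++ [e]) (budget - 1) = true := by
          apply ih
        -- S = e :: r
          refine ⟨r, hr, ?_, by simpa using hSeq⟩
          simp only [List.length_cons] at hSlen
          push_cast at hSlen ⊢
          omega
        simp [h1, hb, hleft]

theorem search_sound (tgt : PySem.Set Int) (rules : List (PySem.Set Int × PySem.Set Int))
    (rest : List Int) :
    ∀ (chosen : List Int) (budget : Int), 0 ≤ budget →
      altSearch tgt rules rest chosen budget = true →
      ∃ S : List Int, S.Sublist rest ∧ (S.length : Int) ≤ budget ∧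
        PySem.Set.equal (altClosure rules (chosen ++ S)) tgt = true := by
  induction rest with
  | nil =>
    intro chosen budget hb hs
    rw [altSearch] at hs
    by_cases h1 : PySem.Set.equal (altClosure rules chosen) tgt = true
    · exact ⟨[], List.Sublist.refl _, by simpa using hb, by simpa using h1⟩
    · simp [h1] at hs
  | cons e rest' ih =>
    intro chosen budget hb hs
    rw [altSearch] at hs
    by_cases h1 : PySem.Set.equal (altClosure rules chosen) tgt = true
    · exact ⟨[], List.nil_sublist _, by simpa using hb, by simpa using h1⟩
    · by_cases hb0 : budget = 0
      · simp [h1, hb0] at hs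
      · have hguard : ¬ ((budget == 0 || (e :: rest').isEmpty) = true) := by simp [hb0]
        rw [if_neg h1, if_neg hguard] at hs
        change (altSearch tgt rules rest' (chosen ++ [e]) (budget - 1) ||
          altSearch tgt rules rest' chosen budget) = true at hs
        by_cases hA : altSearch tgt rules rest' (chosen ++ [e]) (budget - 1) = true
        case neg =>
          rw [Bool.not_eq_true] at hA
          rw [hA, Bool.false_or] at hs
          obtain ⟨S, hSsub, hSlen, hSeq⟩ := ih chosen budget hb hs
          exact ⟨S, hSsub.cons e, hSlen, hSeq⟩
        case pos =>
          obtain ⟨S', hS'sub, hS'len, hS'eq⟩ := ih (chosen ++ [e]) (budget - 1) (by omega) hA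
          refine ⟨e :: S', List.cons_sublist_cons.mpr hS'sub, ?_, by simpa using hS'eq⟩
          simp only [List.length_cons]
          push_cast at hS'len ⊢
          omega

-- ---- assembly ----

theorem alt_true_iff (A : List Int) (F : List (List Int × List Int)) (M : Int) (hM : ¬ M < 0) :
    is_minimum_cardinality_key_alt A F M = true ↔
      ∃ s : List Int, s.Sublist A ∧ (s.length : Int) ≤ M ∧ pyIsSuperkey s A F = true := by
  have helems : A.foldl (fun acc a => if PySem.Set.contains acc a then acc else acc ++ [a]) [] =
      PySem.Set.ofList A := rfl
  unfold is_minimum_cardinality_key_alt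
  simp only [hM, if_false, helems, PySem.List.len_eq]
  constructor
  · intro h
    have hb0 : (0:Int) ≤ if M < ((PySem.Set.ofList A).length : Int) then M
        else ((PySem.Set.ofList A).length : Int) := by split <;> omega
    obtain ⟨S, hSsub, hSlen, hSeq⟩ := search_sound _ _ _ _ _ hb0 h
    rw [List.nil_append] at hSeq
    refine ⟨S, hSsub.trans (ofList_sublist A), ?_, ?_⟩
    · by_cases hMd : M < ((PySem.Set.ofList A).length : Int) <;> simp [hMd] at hSlen
      · exact hSlen
      · have := hSsub.length_le
        omega
    · rw [keyA_iff]
      exact (keyB_iff A F S).mp hSeq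
  · rintro ⟨s, hsub, hlen, hkey⟩
    apply search_complete
    set T := (PySem.Set.ofList A).filter (fun x => decide (x ∈ s)) with hT
    have hTnodup : T.Nodup := (PySem.Set.nodup_ofList A).filter _
    have hTmem : ∀ x : Int, x ∈ T ↔ x ∈ s := by
      intro x
      rw [hT, List.mem_filter]
      simp only [decide_eq_true_iff]
      constructor
      · exact fun h => h.2
      · intro h
        exact ⟨by simp [PySem.Set.mem_ofList]; exact hsub.subset h, h⟩
    have hTperm : T.Perm (PySem.Set.ofList s) :=
      (List.perm_ext_iff_of_nodup hTnodup (PySem.Set.nodup_ofList s)).mpr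
        (fun x => by rw [hTmem x]; simp [PySem.Set.mem_ofList])
    have hTlen : T.length ≤ s.length := by
      have h1 := hTperm.length_eq
      have h2 := PySem.Set.length_ofList_le s
      omega
    have hTsub : T.Sublist (PySem.Set.ofList A) := by rw [hT]; exact List.filter_sublist
    have hTd : T.length ≤ (PySem.Set.ofList A).length := hTsub.length_le
    refine ⟨T, hTsub, ?_, ?_⟩
    · split <;> push_cast <;> omega
    · rw [List.nil_append, keyB_iff]
      intro x
      rw [cloMem_congr F T s hTmem x]
      exact (keyA_iff s A F).mp hkey x

-- ===== VERDICT (by name: the statement is the Claim_ definition above) =====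
theorem is_minimum_cardinality_key_spec : Claim_equal_is_minimum_cardinality_key := by
  intro A F M _hdom
  unfold Spec_is_minimum_cardinality_key
  by_cases hM : M < 0
  · rw [portA_neg A F M hM]
    simp [is_minimum_cardinality_key_alt, hM]
  · rw [Bool.eq_iff_iff, portA_true_iff, alt_true_iff A F M hM]
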